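-- pv_equiv track=rewrite | github.com/AnonGit90210/RamanujanMachine | latex.py | latex_cont_frac
-- ===== SOURCE A (Python) =====
-- def latex_cont_frac(a, b, current_expression=''):
--     """Generates a ContFrac latex expression from a, b.
--     a - a list of (numerical) values of a for iterative depths.
--     b - the same.
--     current_expression - for inner use."""
--     # The expression is built from bottom (the most inner fraction) up (to the outer fraction).
--     # current_expression saves the so far built expression, and is returned at the end
--     if current_expression == '':
--         current_expression = str(a[-1]) + ' + \dots'
--
--     if len(a) > 1:
--         new_iteration = r'{0} + \frac{{ {1} }} {{ {2} }}'.format(a[-2], b[-1], current_expression)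
--         return latex_cont_frac(a[:-1], b[:-1], new_iteration)
--     else:
--         return current_expression
-- ===== SOURCE B (Python) =====
-- def latex_cont_frac(a, b, current_expression=''):
--     """Single-pass rebuild: emit the n-1 prefix pieces left-to-right, then the
--     innermost term, then the n-1 closing braces, one join (O(n) vs A's O(n^2))."""
--     expr = current_expression if current_expression != '' else str(a[-1]) + ' + \dots'
--     n, m = len(a), len(b)
--     parts = [
--         '{0} + \\frac{{ {1} }} {{ '.format(a[i], b[m - n + 1 + i])
--         for i in range(n - 1)
--     ]
--     return ''.join(parts) + expr + ' }' * (n - 1)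
-- ===== Notes on version B (the rewrite author's own statement) =====
-- stated objective: faster
-- what changed: Replaced A's recursion that re-slices a[:-1]/b[:-1] and re-formats the growing expression at every depth by a single left-to-right pass that emits the n-1 prefix pieces, the innermost term and the n-1 closing braces, concatenated once.
import Mathlib
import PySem

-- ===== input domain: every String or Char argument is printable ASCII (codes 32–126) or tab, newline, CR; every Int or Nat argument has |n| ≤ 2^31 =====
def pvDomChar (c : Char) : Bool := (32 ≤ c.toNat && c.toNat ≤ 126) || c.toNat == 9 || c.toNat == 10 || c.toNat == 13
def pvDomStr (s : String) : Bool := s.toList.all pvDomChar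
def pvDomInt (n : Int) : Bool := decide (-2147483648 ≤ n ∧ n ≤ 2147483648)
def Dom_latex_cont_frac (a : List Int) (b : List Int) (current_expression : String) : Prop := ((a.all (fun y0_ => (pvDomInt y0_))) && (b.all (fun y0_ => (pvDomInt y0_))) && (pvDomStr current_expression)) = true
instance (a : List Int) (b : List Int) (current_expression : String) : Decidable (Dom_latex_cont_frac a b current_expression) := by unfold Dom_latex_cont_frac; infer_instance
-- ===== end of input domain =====

-- B replaces A's O(n^2) recursive slicing/reformatting by one left-to-right pass
-- emitting prefix pieces, the innermost term, and the closing braces, joined once.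

-- ===== PORT A =====
def latex_cont_frac (a : List Int) (b : List Int) (current_expression : String) : String :=
  let ce := if current_expression = "" then
      PySem.Int.toStr (PySem.List.pyGetD a (-1) 0) ++ " + \\dots"
    else current_expression
  if _h : 1 < a.length then
    let new_iteration := PySem.Int.toStr (PySem.List.pyGetD a (-2) 0) ++ " + \\frac{ " ++
      PySem.Int.toStr (PySem.List.pyGetD b (-1) 0) ++ " } { " ++ ce ++ " }"
    latex_cont_frac (PySem.List.slice a none (some (-1))) (PySem.List.slice b none (some (-1)))
      new_iteration
  else ce
termination_by a.length
decreasing_by simp only [PySem.List.slice_to_neg_one, List.length_dropLast]; omega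

-- ===== PORT B =====
def latex_cont_frac_alt (a : List Int) (b : List Int) (current_expression : String) : String :=
  let expr := if current_expression = "" then
      PySem.Int.toStr (PySem.List.pyGetD a (-1) 0) ++ " + \\dots"
    else current_expression
  let n := a.length
  let m := b.length
  let parts := (List.range (n - 1)).map (fun i : Nat =>
    PySem.Int.toStr (PySem.List.pyGetD a (i : Int) 0) ++ " + \\frac{ " ++
    PySem.Int.toStr (PySem.List.pyGetD b ((m : Int) - (n : Int) + 1 + (i : Int)) 0) ++ " } { ")
  PySem.Str.join "" parts ++ expr ++ PySem.Str.join "" (List.replicate (n - 1) " }")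

-- ===== PRECONDITION & SPEC =====
-- Pre_ excludes exactly the inputs on which A raises IndexError: an empty a with an
-- empty current_expression (a[-1]), or b shorter than len(a)-1 (b[-1] at some depth).
def Pre_latex_cont_frac (a : List Int) (b : List Int) (current_expression : String) : Prop :=
  (a ≠ [] ∨ current_expression ≠ "") ∧ a.length ≤ b.length + 1
instance (a : List Int) (b : List Int) (current_expression : String) : Decidable (Pre_latex_cont_frac a b current_expression) := by unfold Pre_latex_cont_frac; infer_instance
def pvWitness_latex_cont_frac : List Int × List Int × String := ([1, 2, 3], [4, 5], "")
def Spec_latex_cont_frac (a : List Int) (b : List Int) (current_expression : String) (out : String) : Prop := out = latex_cont_frac_alt a b current_expression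
instance (a : List Int) (b : List Int) (current_expression : String) (out : String) : Decidable (Spec_latex_cont_frac a b current_expression out) := by unfold Spec_latex_cont_frac; infer_instance

-- ===== CLAIM (what is proved, stated in full; the proofs are below) =====
def Claim_equal_latex_cont_frac : Prop := ∀ (a : List Int) (b : List Int) (current_expression : String), Dom_latex_cont_frac a b current_expression → Pre_latex_cont_frac a b current_expression → Spec_latex_cont_frac a b current_expression (latex_cont_frac a b current_expression)

-- ===== LEMMAS AND PROOFS =====

theorem join0_nil : PySem.Str.join "" ([] : List String) = "" := by
  apply String.toList_inj.mp
  simp [PySem.Str.toList_join, PySem.Chars.join_nil]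

theorem join0_cons (s : String) (l : List String) :
    PySem.Str.join "" (s :: l) = s ++ PySem.Str.join "" l := by
  apply String.toList_inj.mp
  cases l with
  | nil => simp [PySem.Str.toList_join, PySem.Chars.join_singleton, PySem.Chars.join_nil]
  | cons t l => simp [PySem.Str.toList_join, PySem.Chars.join_cons_cons]

theorem join0_append (l1 l2 : List String) :
    PySem.Str.join "" (l1 ++ l2) = PySem.Str.join "" l1 ++ PySem.Str.join "" l2 := by
  induction l1 with
  | nil => simp [join0_nil, String.empty_append]
  | cons s l ih => simp [join0_cons, ih, String.append_assoc]

theorem append_brace_ne_empty (s : String) : s ++ " }" ≠ "" := by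
  intro h
  have h2 := congrArg String.toList h
  simp at h2

theorem alt_step (a b : List Int) (ce : String) (h2 : 2 ≤ a.length) (hb : a.length ≤ b.length + 1) :
    latex_cont_frac_alt a.dropLast b.dropLast
      (PySem.Int.toStr (PySem.List.pyGetD a (-2) 0) ++ " + \\frac{ " ++
       PySem.Int.toStr (PySem.List.pyGetD b (-1) 0) ++ " } { " ++ ce ++ " }")
    = PySem.Str.join "" ((List.range (a.length - 1)).map (fun i : Nat =>
        PySem.Int.toStr (PySem.List.pyGetD a (i : Int) 0) ++ " + \\frac{ " ++
        PySem.Int.toStr (PySem.List.pyGetD b ((b.length : Int) - (a.length : Int) + 1 + (i : Int)) 0) ++ " } { "))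
      ++ ce ++ PySem.Str.join "" (List.replicate (a.length - 1) " }") := by
  obtain ⟨k, hk⟩ : ∃ k, a.length = k + 2 := ⟨a.length - 2, by omega⟩
  have hm : 1 ≤ b.length := by omega
  have hlb : b.dropLast.length = b.length - 1 := by simp
  have hla : a.dropLast.length = k + 1 := by simp [hk]
  have hbc : ((b.length - 1 : Nat) : Int) = (b.length : Int) - 1 := by omega
  have hr : k + 2 - 1 = k + 1 := by omega
  simp only [latex_cont_frac_alt]
  rw [if_neg (append_brace_ne_empty _)]
  simp only [hla, hlb, hbc, hk, hr, Nat.add_sub_cancel]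
  push_cast
  rw [List.range_succ, List.map_append, join0_append]
  simp only [List.map_cons, List.map_nil, join0_cons, join0_nil, List.replicate_succ]
  have hmap : List.map (fun i : Nat =>
      PySem.Int.toStr (PySem.List.pyGetD a.dropLast ((i : Int)) 0) ++ " + \\frac{ " ++
        PySem.Int.toStr (PySem.List.pyGetD b.dropLast ((b.length : Int) - 1 - ((k : Int) + 1) + 1 + (i : Int)) 0) ++ " } { ")
      (List.range k)
      = List.map (fun i : Nat =>
      PySem.Int.toStr (PySem.List.pyGetD a ((i : Int)) 0) ++ " + \\frac{ " ++
        PySem.Int.toStr (PySem.List.pyGetD b ((b.length : Int) - ((k : Int) + 2) + 1 + (i : Int)) 0) ++ " } { ")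
      (List.range k) := by
    apply List.map_congr_left
    intro i hi
    have hik : i < k := List.mem_range.mp hi
    have e1 : PySem.List.pyGetD a.dropLast ((i : Int)) 0 = PySem.List.pyGetD a ((i : Int)) 0 := by
      rw [PySem.List.pyGetD_natCast, PySem.List.pyGetD_natCast,
        List.getD_eq_getElem _ 0 (by simp [hk]; omega), List.getD_eq_getElem _ 0 (by omega),
        List.getElem_dropLast]
    have hidx : (b.length : Int) - 1 - ((k : Int) + 1) + 1 + (i : Int)
        = (b.length : Int) - ((k : Int) + 2) + 1 + (i : Int) := by ring
    have h0 : (0 : Int) ≤ (b.length : Int) - ((k : Int) + 2) + 1 + (i : Int) := by omega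
    have e2 : PySem.List.pyGetD b.dropLast ((b.length : Int) - 1 - ((k : Int) + 1) + 1 + (i : Int)) 0
        = PySem.List.pyGetD b ((b.length : Int) - ((k : Int) + 2) + 1 + (i : Int)) 0 := by
      rw [hidx,
        PySem.List.pyGetD_eq_getElem _ 0 h0 (by simp only [List.length_dropLast]; omega),
        PySem.List.pyGetD_eq_getElem _ 0 h0 (by omega), List.getElem_dropLast]
    rw [e1, e2]
  rw [hmap]
  have eA : PySem.List.pyGetD a (-2) 0 = PySem.List.pyGetD a (((k : Nat) : Int)) 0 := by
    rw [PySem.List.pyGetD_neg_ofNat a 2 0 (by omega) (by omega), PySem.List.pyGetD_natCast,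
      List.getD_eq_getElem _ 0 (by omega)]
    simp only [show a.length - 2 = k from by omega]
  have eB : PySem.List.pyGetD b (-1) 0
      = PySem.List.pyGetD b ((b.length : Int) - ((k : Int) + 2) + 1 + ((k : Nat) : Int)) 0 := by
    have h0 : (0 : Int) ≤ (b.length : Int) - ((k : Int) + 2) + 1 + ((k : Nat) : Int) := by omega
    rw [PySem.List.pyGetD_neg_ofNat b 1 0 (by omega) (by omega),
      PySem.List.pyGetD_eq_getElem _ 0 h0 (by omega)]
    simp only [show ((b.length : Int) - ((k : Int) + 2) + 1 + ((k : Nat) : Int)).toNat = b.length - 1 from by omega]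
  rw [eA, eB]
  simp only [String.append_assoc, String.append_empty]

theorem main_lemma (n : Nat) : ∀ (a b : List Int) (ce : String), a.length = n →
    a.length ≤ b.length + 1 → (a ≠ [] ∨ ce ≠ "") →
    latex_cont_frac a b ce = latex_cont_frac_alt a b ce := by
  induction n with
  | zero =>
    intro a b ce hlen hb hne
    have ha : a = [] := List.eq_nil_of_length_eq_zero hlen
    subst ha
    have hce : ce ≠ "" := hne.resolve_left (by simp)
    rw [latex_cont_frac]
    simp [latex_cont_frac_alt, hce, join0_nil, String.empty_append, String.append_empty]
  | succ n ih =>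
    intro a b ce hlen hb hne
    by_cases h1 : a.length ≤ 1
    · rw [latex_cont_frac]
      have hn1 : ¬ 1 < a.length := by omega
      have h0 : a.length - 1 = 0 := by omega
      simp only [dif_neg hn1, latex_cont_frac_alt, h0, List.range_zero, List.map_nil,
        List.replicate_zero, join0_nil]
      rw [String.empty_append, String.append_empty]
    · have h2 : 2 ≤ a.length := by omega
      rw [latex_cont_frac]
      simp only [dif_pos (show 1 < a.length by omega), PySem.List.slice_to_neg_one]
      rw [ih a.dropLast b.dropLast _ (by simp; omega) (by simp; omega)
        (Or.inr (append_brace_ne_empty _))]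
      rw [alt_step a b _ h2 hb]
      simp only [latex_cont_frac_alt]

-- ===== VERDICT (by name: the statement is the Claim_ definition above) =====
theorem latex_cont_frac_spec : Claim_equal_latex_cont_frac := by
  intro a b ce _hdom hpre
  exact main_lemma a.length a b ce rfl hpre.2 hpre.1
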